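-- pv_equiv track=rewrite | github.com/wael-daaboul/L10n-Audit-Toolkit | l10n_audit/audits/ai_review.py | _relevant_glossary_for_source
-- ===== SOURCE A (Python) =====
-- def _relevant_glossary_for_source(source_text: str, glossary_map: dict[str, str]) -> dict[str, str]:
--     """Return only glossary entries that are relevant to this source string."""
--     if not source_text or not glossary_map:
--         return {}
--     lowered_source = source_text.lower()
--     matched: dict[str, str] = {}
--     for term_en, approved_ar in glossary_map.items():
--         if term_en.lower() in lowered_source:
--             matched[term_en] = approved_ar
--     return matched
-- ===== SOURCE B (Python) =====
-- def _relevant_glossary_for_source(source_text: str, glossary_map: dict[str, str]) -> dict[str, str]: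
--     """Return only glossary entries that are relevant to this source string.
--
--     Instead of scanning the source once per glossary term, index the lowered
--     terms in a hash set, collect the distinct term lengths, and slide over the
--     source once, probing the set with each window: the per-term scan of the
--     source disappears.
--     """
--     if not source_text or not glossary_map:
--         return {}
--     s = source_text.lower()
--     n = len(s)
--     terms = {t.lower() for t in glossary_map}
--     lengths = {len(t) for t in terms}
--     found = set()
--     for i in range(n):
--         for length in lengths:
--             cand = s[i:i + length]
--             if cand in terms:
--                 found.add(cand)
--     return {term_en: approved_ar for term_en, approved_ar in glossary_map.items()
--             if term_en.lower() in found}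
-- ===== Notes on version B (the rewrite author's own statement) =====
-- stated objective: faster
-- what changed: Replaced the per-term substring scan of the source with a single sliding-window pass over the source probing a hash set of lowered terms (one probe per distinct term length), then emitting matches in glossary order.
import Mathlib
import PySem

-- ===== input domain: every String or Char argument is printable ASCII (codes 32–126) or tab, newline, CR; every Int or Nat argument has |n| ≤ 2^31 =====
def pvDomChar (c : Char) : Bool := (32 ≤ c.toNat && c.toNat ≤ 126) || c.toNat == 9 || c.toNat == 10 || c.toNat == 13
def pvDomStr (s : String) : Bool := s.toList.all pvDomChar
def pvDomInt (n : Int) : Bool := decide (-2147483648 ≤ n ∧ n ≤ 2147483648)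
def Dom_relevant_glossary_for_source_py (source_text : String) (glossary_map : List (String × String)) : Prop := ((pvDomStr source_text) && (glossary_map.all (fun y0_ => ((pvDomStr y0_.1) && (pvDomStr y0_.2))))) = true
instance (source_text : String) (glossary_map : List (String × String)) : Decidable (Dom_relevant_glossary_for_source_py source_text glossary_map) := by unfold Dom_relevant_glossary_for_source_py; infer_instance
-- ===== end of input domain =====

-- B replaces A's per-term substring scan of the source by one sliding-window pass over the
-- source probing a set of lowered terms (one probe per distinct term length), then emits
-- the matched entries in glossary order (measured faster in a timing run).

-- ===== PORT A =====
def relevant_glossary_for_source_py (source_text : String) (glossary_map : List (String × String)) : List (String × String) :=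
  if PySem.Str.len source_text = 0 ∨ glossary_map = [] then []
  else
    let lowered_source := PySem.Str.lower source_text
    glossary_map.foldl
      (fun (matched : PySem.Dict String String) p =>
        if PySem.Str.isIn (PySem.Str.lower p.1) lowered_source then matched.insert p.1 p.2
        else matched)
      (PySem.Dict.empty) |>.items

-- ===== PORT B =====
-- the 'for i in range(n): for length in lengths: …' double loop of Source B
def pvFound (s : String) (terms : PySem.Set String) (lengths : PySem.Set Int) : PySem.Set String :=
  (PySem.List.pyRange 0 (PySem.Str.len s) 1).foldl
    (fun found i =>
      lengths.foldl
        (fun found L =>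
          let cand := PySem.Str.slice s (some i) (some (i + L))
          if PySem.Set.contains terms cand then PySem.Set.add found cand else found)
        found)
    PySem.Set.empty

def relevant_glossary_for_source_py_alt (source_text : String) (glossary_map : List (String × String)) : List (String × String) :=
  if PySem.Str.len source_text = 0 ∨ glossary_map = [] then []
  else
    let s := PySem.Str.lower source_text
    let terms : PySem.Set String := PySem.Set.ofList (glossary_map.map (fun q => PySem.Str.lower q.1))
    let lengths : PySem.Set Int := PySem.Set.ofList (terms.map (fun t => PySem.Str.len t))
    let found := pvFound s terms lengths
    glossary_map.foldl
      (fun (d : PySem.Dict String String) p =>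
        if PySem.Set.contains found (PySem.Str.lower p.1) then d.insert p.1 p.2 else d)
      (PySem.Dict.empty) |>.items

-- ===== PRECONDITION & SPEC =====
def Spec_relevant_glossary_for_source_py (source_text : String) (glossary_map : List (String × String)) (out : List (String × String)) : Prop := out = relevant_glossary_for_source_py_alt source_text glossary_map
instance (source_text : String) (glossary_map : List (String × String)) (out : List (String × String)) : Decidable (Spec_relevant_glossary_for_source_py source_text glossary_map out) := by unfold Spec_relevant_glossary_for_source_py; infer_instance

-- ===== CLAIM (what is proved, stated in full; the proofs are below) =====
def Claim_equal_relevant_glossary_for_source_py : Prop := ∀ (source_text : String) (glossary_map : List (String × String)), Dom_relevant_glossary_for_source_py source_text glossary_map → Spec_relevant_glossary_for_source_py source_text glossary_map (relevant_glossary_for_source_py source_text glossary_map)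

-- ===== LEMMAS AND PROOFS =====

-- membership after the inner 'for length in lengths' loop
lemma pv_mem_inner (s : String) (terms : PySem.Set String) (i : Int) (lengths : List Int)
    (f0 : PySem.Set String) (y : String) :
    y ∈ lengths.foldl
        (fun found L =>
          let cand := PySem.Str.slice s (some i) (some (i + L))
          if PySem.Set.contains terms cand then PySem.Set.add found cand else found)
        f0
    ↔ y ∈ f0 ∨ ∃ L ∈ lengths,
        PySem.Set.contains terms (PySem.Str.slice s (some i) (some (i + L))) = true ∧
        y = PySem.Str.slice s (some i) (some (i + L)) := by
  induction lengths generalizing f0 with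
  | nil => simp
  | cons L rest ih =>
    simp only [List.foldl_cons]
    rw [ih]
    by_cases h : PySem.Set.contains terms (PySem.Str.slice s (some i) (some (i + L))) = true
    · simp only [h, if_true, PySem.Set.mem_add, List.mem_cons]
      constructor
      · rintro ((hy | hy) | ⟨L', hL', hc, hy⟩)
        · exact Or.inl hy
        · exact Or.inr ⟨L, Or.inl rfl, h, hy⟩
        · exact Or.inr ⟨L', Or.inr hL', hc, hy⟩
      · rintro (hy | ⟨L', (rfl | hL'), hc, hy⟩)
        · exact Or.inl (Or.inl hy)
        · exact Or.inl (Or.inr hy)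
        · exact Or.inr ⟨L', hL', hc, hy⟩
    · simp only [h]
      simp only [List.mem_cons]
      constructor
      · rintro (hy | ⟨L', hL', hc, hy⟩)
        · exact Or.inl hy
        · exact Or.inr ⟨L', Or.inr hL', hc, hy⟩
      · rintro (hy | ⟨L', (rfl | hL'), hc, hy⟩)
        · exact Or.inl hy
        · exact absurd hc h
        · exact Or.inr ⟨L', hL', hc, hy⟩

-- membership after the outer 'for i in range(n)' loop, over an arbitrary index list
lemma pv_mem_outer (s : String) (terms : PySem.Set String) (lengths : PySem.Set Int)
    (idxs : List Int) (f0 : PySem.Set String) (y : String) :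
    y ∈ idxs.foldl
        (fun found i =>
          lengths.foldl
            (fun found L =>
              let cand := PySem.Str.slice s (some i) (some (i + L))
              if PySem.Set.contains terms cand then PySem.Set.add found cand else found)
            found)
        f0
    ↔ y ∈ f0 ∨ ∃ i ∈ idxs, ∃ L ∈ lengths,
        PySem.Set.contains terms (PySem.Str.slice s (some i) (some (i + L))) = true ∧
        y = PySem.Str.slice s (some i) (some (i + L)) := by
  induction idxs generalizing f0 with
  | nil => simp
  | cons i rest ih =>
    simp only [List.foldl_cons]
    rw [ih, pv_mem_inner]
    simp only [List.mem_cons]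
    constructor
    · rintro ((hy | ⟨L, hL, hc, hy⟩) | ⟨i', hi', rest'⟩)
      · exact Or.inl hy
      · exact Or.inr ⟨i, Or.inl rfl, L, hL, hc, hy⟩
      · exact Or.inr ⟨i', Or.inr hi', rest'⟩
    · rintro (hy | ⟨i', (rfl | hi'), rest'⟩)
      · exact Or.inl (Or.inl hy)
      · exact Or.inl (Or.inr rest')
      · exact Or.inr ⟨i', hi', rest'⟩

lemma pv_mem_pvFound (s : String) (terms : PySem.Set String) (lengths : PySem.Set Int) (y : String) :
    y ∈ pvFound s terms lengths
    ↔ ∃ i, 0 ≤ i ∧ i < PySem.Str.len s ∧ ∃ L ∈ lengths,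
        PySem.Set.contains terms (PySem.Str.slice s (some i) (some (i + L))) = true ∧
        y = PySem.Str.slice s (some i) (some (i + L)) := by
  unfold pvFound
  rw [pv_mem_outer]
  constructor
  · rintro (hy | ⟨i, hi, h⟩)
    · simp [PySem.Set.empty] at hy
    · exact ⟨i, (PySem.List.mem_pyRange_one.mp hi).1, (PySem.List.mem_pyRange_one.mp hi).2, h⟩
  · rintro ⟨i, h0, hn, h⟩
    exact Or.inr ⟨i, PySem.List.mem_pyRange_one.mpr ⟨h0, hn⟩, h⟩

-- a clamped slice of s with nonnegative bounds is an infix of s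
lemma pv_slice_infix (s : String) (i L : Int) (h0 : 0 ≤ i) (hL : 0 ≤ L) :
    (PySem.Str.slice s (some i) (some (i + L))).toList <:+: s.toList := by
  rw [PySem.Str.toList_slice, PySem.Chars.slice_eq_listSlice,
    PySem.List.slice_toNat _ h0 (by omega)]
  exact (List.take_prefix _ _).isInfix.trans (List.drop_suffix _ _).isInfix

-- the central fact: after the scan, 'term.lower() in found' is exactly 'term.lower() in s'
lemma pv_contains_found_eq (source_text : String) (glossary_map : List (String × String))
    (hs : ¬ PySem.Str.len source_text = 0) (p : String × String) (hp : p ∈ glossary_map) :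
    PySem.Set.contains
      (pvFound (PySem.Str.lower source_text)
        (PySem.Set.ofList (glossary_map.map (fun q => PySem.Str.lower q.1)))
        (PySem.Set.ofList
          ((PySem.Set.ofList (glossary_map.map (fun q => PySem.Str.lower q.1))).map
            (fun t => PySem.Str.len t))))
      (PySem.Str.lower p.1)
    = PySem.Str.isIn (PySem.Str.lower p.1) (PySem.Str.lower source_text) := by
  set s := PySem.Str.lower source_text with hsdef
  set terms : PySem.Set String := PySem.Set.ofList (glossary_map.map (fun q => PySem.Str.lower q.1)) with htermsdef
  have hterm_mem : PySem.Str.lower p.1 ∈ terms := by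
    rw [htermsdef, PySem.Set.mem_ofList]
    exact List.mem_map.mpr ⟨p, hp, rfl⟩
  have hlen_mem : PySem.Str.len (PySem.Str.lower p.1) ∈
      PySem.Set.ofList (terms.map (fun t => PySem.Str.len t)) := by
    rw [PySem.Set.mem_ofList]
    exact List.mem_map.mpr ⟨PySem.Str.lower p.1, hterm_mem, rfl⟩
  rw [Bool.eq_iff_iff, PySem.Set.contains_iff, PySem.Str.isIn_iff_infix, pv_mem_pvFound]
  constructor
  · rintro ⟨i, h0, _, L, hL, _, hy⟩
    have hL0 : 0 ≤ L := by
      rw [PySem.Set.mem_ofList] at hL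
      obtain ⟨t, _, rfl⟩ := List.mem_map.mp hL
      rw [PySem.Str.len_eq]
      exact Int.natCast_nonneg _
    rw [hy]
    exact pv_slice_infix s i L h0 hL0
  · intro hinf
    obtain ⟨pre, suf, hdec⟩ := hinf
    have hlen : PySem.Str.len (PySem.Str.lower p.1) = ((PySem.Str.lower p.1).toList.length : Int) :=
      PySem.Str.len_eq _
    have hslen : PySem.Str.len s = (s.toList.length : Int) := PySem.Str.len_eq _
    have hlens : s.toList.length = pre.length + (PySem.Str.lower p.1).toList.length + suf.length := by
      rw [← hdec]; simp; omega
    have hspos : 0 < s.toList.length := by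
      have h1 : s.toList.length = source_text.toList.length := by
        rw [hsdef]
        simp [PySem.Str.toList_lower, PySem.Chars.lower]
      have h2 : source_text.toList.length ≠ 0 := by
        intro h
        exact hs (by rw [PySem.Str.len_eq, h]; rfl)
      omega
    by_cases hnil : (PySem.Str.lower p.1).toList = []
    · -- the empty term: found at i = 0 with window length 0
      have hslice : PySem.Str.slice s (some 0) (some (0 + PySem.Str.len (PySem.Str.lower p.1)))
          = PySem.Str.lower p.1 := by
        apply String.toList_inj.mp
        rw [PySem.Str.toList_slice, PySem.Chars.slice_eq_listSlice, hlen, hnil]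
        simp [PySem.List.slice_toNat]
      refine ⟨0, le_refl 0, by omega, PySem.Str.len (PySem.Str.lower p.1), hlen_mem, ?_, ?_⟩
      · rw [hslice]
        exact (PySem.Set.contains_iff _ _).mpr hterm_mem
      · rw [hslice]
    · -- a nonempty term: found where the infix decomposition places it
      have hpos : 0 < (PySem.Str.lower p.1).toList.length := List.length_pos_iff.mpr hnil
      have hslice : PySem.Str.slice s (some (pre.length : Int))
          (some ((pre.length : Int) + PySem.Str.len (PySem.Str.lower p.1))) = PySem.Str.lower p.1 := by
        apply String.toList_inj.mp
        rw [PySem.Str.toList_slice, PySem.Chars.slice_eq_listSlice, hlen,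
          PySem.List.slice_toNat _ (by omega) (by omega)]
        rw [← hdec]
        have h1 : (((pre.length : Int)) + (((PySem.Str.lower p.1).toList.length : Nat) : Int)).toNat -
            ((pre.length : Int)).toNat = (PySem.Str.lower p.1).toList.length := by omega
        have h2 : ((pre.length : Int)).toNat = pre.length := by omega
        rw [h1, h2, List.append_assoc, List.drop_left, List.take_left]
      refine ⟨(pre.length : Int), by omega, by omega, PySem.Str.len (PySem.Str.lower p.1), hlen_mem, ?_, ?_⟩
      · rw [hslice]
        exact (PySem.Set.contains_iff _ _).mpr hterm_mem
      · rw [hslice]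

-- ===== VERDICT (by name: the statement is the Claim_ definition above) =====
theorem relevant_glossary_for_source_py_spec : Claim_equal_relevant_glossary_for_source_py := by
  intro source_text glossary_map _dom
  unfold Spec_relevant_glossary_for_source_py
  simp only [relevant_glossary_for_source_py, relevant_glossary_for_source_py_alt]
  by_cases hg : PySem.Str.len source_text = 0 ∨ glossary_map = []
  · rw [if_pos hg, if_pos hg]
  · rw [if_neg hg, if_neg hg]
    refine congrArg PySem.Dict.items ?_
    refine PySem.List.foldl_congr_mem' _ _ _ _ ?_
    intro p hp acc
    rw [pv_contains_found_eq source_text glossary_map (fun h => hg (Or.inl h)) p hp]
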